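-- pv_equiv track=rewrite | github.com/jamwil/scripts | todoist_completed_report.py | _group_by_day
-- ===== SOURCE A (Python) =====
-- from collections import defaultdict, OrderedDict
-- from typing import Any, Dict, Iterable, List, Optional, Tuple
--
-- def _group_by_day(items: List[Dict[str, Any]]) -> "OrderedDict[str, List[Dict[str, Any]]]":
--     buckets: Dict[str, List[Dict[str, Any]]] = defaultdict(list)
--     for it in items:
--         completed_at = it.get("completed_at")
--         if not completed_at:
--             continue
--         day = completed_at[:10]  # YYYY-MM-DD (UTC from API)
--         buckets[day].append(it)
--     # Sort by day then by completion time
--     ordered = OrderedDict()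
--     for day in sorted(buckets.keys()):
--         ordered[day] = sorted(buckets[day], key=lambda x: x.get("completed_at", ""))
--     return ordered
-- ===== SOURCE B (Python) =====
-- from collections import OrderedDict
--
--
-- def _group_by_day(items):
--     ordered = OrderedDict()
--     for it in sorted(
--         (x for x in items if x.get("completed_at")),
--         key=lambda x: x["completed_at"],
--     ):
--         ordered.setdefault(x_day(it), []).append(it)
--     return ordered
--
--
-- def x_day(it):
--     return it["completed_at"][:10]
-- ===== Notes on version B (the rewrite author's own statement) =====
-- stated objective: alternative
-- what changed: A buckets items into a defaultdict by day and then sorts the day keys and each bucket separately; B performs one global stable sort of the truthy-completed_at items by completed_at and builds the OrderedDict in a single grouping pass over that sorted list (the day is a prefix of the timestamp, so the global order yields both the sorted days and the within-day order).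
import Mathlib
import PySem

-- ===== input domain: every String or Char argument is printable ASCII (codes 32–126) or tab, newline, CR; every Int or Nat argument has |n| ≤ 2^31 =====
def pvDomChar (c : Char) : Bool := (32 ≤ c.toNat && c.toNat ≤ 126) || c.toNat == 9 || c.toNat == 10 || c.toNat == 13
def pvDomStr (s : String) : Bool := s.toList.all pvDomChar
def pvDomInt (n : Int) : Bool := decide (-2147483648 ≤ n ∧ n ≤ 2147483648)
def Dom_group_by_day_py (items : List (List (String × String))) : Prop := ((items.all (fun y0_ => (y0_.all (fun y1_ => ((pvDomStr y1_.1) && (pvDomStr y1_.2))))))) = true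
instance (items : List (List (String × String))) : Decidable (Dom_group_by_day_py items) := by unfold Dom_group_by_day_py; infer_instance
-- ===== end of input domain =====

-- B replaces A's bucket-then-sort-each-day with one global stable sort by completed_at followed by a
-- single grouping pass (objective: alternative — sort-then-group instead of group-then-sort).


-- it.get("completed_at") with Python falsy (None/"") collapsed to "" — both Pythons compute exactly this expression
def pvCA (it : List (String × String)) : String :=
  ((PySem.Dict.mk it).get? "completed_at").getD ""

-- completed_at[:10]
def pvDay (it : List (String × String)) : String :=
  PySem.Str.slice (pvCA it) none (some 10)

-- ===== PORT A =====
def group_by_day_py (items : List (List (String × String))) : List (String × List (List (String × String))) :=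
  -- buckets = defaultdict(list); for it: skip falsy completed_at, buckets[completed_at[:10]].append(it)
  let buckets : PySem.Dict String (List (List (String × String))) :=
    items.foldl (fun b it =>
      if pvCA it ≠ "" then b.modify (pvDay it) [] (fun l => l ++ [it]) else b)
      PySem.Dict.empty
  -- ordered = OrderedDict(); for day in sorted(buckets.keys()): ordered[day] = sorted(buckets[day], key=…)
  let ordered : PySem.Dict String (List (List (String × String))) :=
    (PySem.List.sorted buckets.keys (fun k => k) false).foldl
      (fun d day => d.insert day (PySem.List.sorted (buckets.getD day []) (fun x => pvCA x) false))
      PySem.Dict.empty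
  ordered.items

-- ===== PORT B =====
def group_by_day_py_alt (items : List (List (String × String))) : List (String × List (List (String × String))) :=
  -- for it in sorted((x for x in items if x.get("completed_at")), key=lambda x: x["completed_at"]):
  --   ordered.setdefault(x_day(it), []).append(it)      -- = ordered[day] = ordered.get(day, []) + [it]
  let done := PySem.List.sorted (items.filter (fun x => decide (pvCA x ≠ ""))) (fun x => pvCA x) false
  let ordered : PySem.Dict String (List (List (String × String))) :=
    done.foldl (fun d it => d.modify (pvDay it) [] (fun l => l ++ [it])) PySem.Dict.empty
  ordered.items

-- ===== PRECONDITION & SPEC =====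
def Spec_group_by_day_py (items : List (List (String × String))) (out : List (String × List (List (String × String)))) : Prop := out = group_by_day_py_alt items
instance (items : List (List (String × String))) (out : List (String × List (List (String × String)))) : Decidable (Spec_group_by_day_py items out) := by unfold Spec_group_by_day_py; infer_instance

-- ===== CLAIM (what is proved, stated in full; the proofs are below) =====
def Claim_equal_group_by_day_py : Prop := ∀ (items : List (List (String × String))), Dom_group_by_day_py items → Spec_group_by_day_py items (group_by_day_py items)

-- ===== LEMMAS AND PROOFS =====

-- lexicographic order of strings is preserved by taking a prefix
theorem pv_take_lex (n : Nat) : ∀ {l m : List Char}, List.Lex (· < ·) l m →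
    List.Lex (· < ·) (l.take n) (m.take n) ∨ l.take n = m.take n := by
  intro l m h
  induction h generalizing n with
  | nil =>
    cases n with
    | zero => right; rfl
    | succ k => left; exact List.Lex.nil
  | rel hab =>
    cases n with
    | zero => right; rfl
    | succ k => left; exact List.Lex.rel hab
  | cons _ ih =>
    cases n with
    | zero => right; rfl
    | succ k =>
      rcases ih k with h' | h'
      · left; exact List.Lex.cons h'
      · right; simp [h']

-- the day (10-char prefix) is monotone in the full timestamp
theorem pv_day_mono (a b : List (String × String)) (h : pvCA a ≤ pvCA b) : pvDay a ≤ pvDay b := by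
  have h10 : ∀ xs : List Char, PySem.List.slice xs none (some 10) = xs.take 10 := by
    intro xs
    have := PySem.List.slice_to_natCast xs 10
    norm_num at this
    exact this
  unfold pvDay
  simp only [PySem.Str.slice, PySem.Chars.slice]
  rw [h10, h10]
  rcases lt_or_eq_of_le h with hlt | heq
  · rw [String.lt_iff_toList_lt] at hlt
    rcases pv_take_lex 10 hlt with h' | h'
    · exact le_of_lt (String.lt_iff_toList_lt.mpr (by simpa [String.toList_ofList] using h'))
    · exact le_of_eq (by rw [h'])
  · rw [heq]

-- building an OrderedDict by inserting fresh keys in a loop appends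
theorem pv_foldl_insert_items {ν : Type} (f : String → ν) :
    ∀ (l : List String) (d : PySem.Dict String ν), l.Nodup →
      (∀ k ∈ l, d.contains k = false) →
      (l.foldl (fun d k => d.insert k (f k)) d).items = d.items ++ l.map (fun k => (k, f k)) := by
  intro l
  induction l with
  | nil => simp
  | cons k t ih =>
    intro d hnd hc
    simp only [List.foldl_cons, List.map_cons]
    rw [ih _ (by simp at hnd; exact hnd.2)]
    · rw [PySem.Dict.items_insert_of_not_contains d _ (hc k (by simp))]
      simp
    · intro k' hk'
      have hne : k ≠ k' := by
        intro h; subst h; exact (List.nodup_cons.mp hnd).1 hk'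
      have := hc k' (List.mem_cons_of_mem _ hk')
      simp only [PySem.Dict.contains_eq_decide_mem_keys, PySem.Dict.mem_keys_insert] at *
      simp only [decide_eq_false_iff_not] at this ⊢
      tauto

-- A's bucket loop, with the 'continue' turned into a filter
theorem pv_buckets_eq (items : List (List (String × String))) :
    (items.foldl (fun b it =>
      if pvCA it ≠ "" then b.modify (pvDay it) [] (fun l => l ++ [it]) else b)
      (PySem.Dict.empty : PySem.Dict String (List (List (String × String)))))
    = ((items.filter (fun it => decide (pvCA it ≠ ""))).map (fun it => (pvDay it, it))).foldl
        (fun b p => b.modify p.1 [] (fun l => l ++ [p.2])) PySem.Dict.empty := by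
  rw [PySem.List.foldl_ite_eq_foldl_filter (fun it => pvCA it ≠ "")]
  rw [List.foldl_map]

theorem pv_buckets_getD (items : List (List (String × String))) (c : String) :
    (items.foldl (fun b it =>
      if pvCA it ≠ "" then b.modify (pvDay it) [] (fun l => l ++ [it]) else b)
      (PySem.Dict.empty : PySem.Dict String (List (List (String × String))))).getD c []
    = (items.filter (fun it => decide (pvCA it ≠ ""))).filter (fun it => pvDay it == c) := by
  rw [pv_buckets_eq, PySem.Dict.getD_foldl_modify_append]
  simp [List.filter_map, Function.comp_def]

theorem pv_buckets_keys (items : List (List (String × String))) :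
    (items.foldl (fun b it =>
      if pvCA it ≠ "" then b.modify (pvDay it) [] (fun l => l ++ [it]) else b)
      (PySem.Dict.empty : PySem.Dict String (List (List (String × String))))).keys
    = PySem.Set.ofList ((items.filter (fun it => decide (pvCA it ≠ ""))).map pvDay) := by
  rw [PySem.List.foldl_ite_eq_foldl_filter (fun it => pvCA it ≠ "")]
  rw [PySem.Dict.keys_foldl_modify_key _ pvDay [] (fun _ it l => l ++ [it])]
  rfl

-- B's grouping loop described the same way
theorem pv_group_keys (s : List (List (String × String))) :
    (s.foldl (fun d it => d.modify (pvDay it) [] (fun l => l ++ [it]))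
      (PySem.Dict.empty : PySem.Dict String (List (List (String × String))))).keys
    = PySem.Set.ofList (s.map pvDay) := by
  rw [PySem.Dict.keys_foldl_modify_key _ pvDay [] (fun _ it l => l ++ [it])]
  rfl

theorem pv_group_eq (s : List (List (String × String))) :
    (s.foldl (fun d it => d.modify (pvDay it) [] (fun l => l ++ [it]))
      (PySem.Dict.empty : PySem.Dict String (List (List (String × String)))))
    = (s.map (fun it => (pvDay it, it))).foldl
        (fun b p => b.modify p.1 [] (fun l => l ++ [p.2])) PySem.Dict.empty := by
  rw [List.foldl_map]

theorem pv_group_getD (s : List (List (String × String))) (c : String) :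
    (s.foldl (fun d it => d.modify (pvDay it) [] (fun l => l ++ [it]))
      (PySem.Dict.empty : PySem.Dict String (List (List (String × String))))).getD c []
    = s.filter (fun it => pvDay it == c) := by
  rw [pv_group_eq, PySem.Dict.getD_foldl_modify_append]
  simp [List.filter_map, Function.comp_def]

-- ---- stable sort commutes with filter ----

theorem pv_insertBy_front {α : Type} (before : α → α → Bool) (x : α) :
    ∀ (zs : List α), (∀ z ∈ zs, before x z = true) → PySem.List.insertBy before x zs = x :: zs := by
  intro zs h
  cases zs with
  | nil => rfl
  | cons y ys => simp [PySem.List.insertBy, h y (by simp)]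

theorem pv_insertBy_pairwise {α κ : Type} [LinearOrder κ] (key : α → κ) (x : α) :
    ∀ (acc : List α), acc.Pairwise (fun a b => key a ≤ key b) →
      (PySem.List.insertBy (fun a b => decide (key a < key b)) x acc).Pairwise
        (fun a b => key a ≤ key b) := by
  intro acc h
  induction acc with
  | nil => simp [PySem.List.insertBy]
  | cons y ys ih =>
    rcases List.pairwise_cons.mp h with ⟨hy, hys⟩
    by_cases hxy : key x < key y
    · simp only [PySem.List.insertBy, hxy, decide_true, if_true]
      exact List.pairwise_cons.mpr ⟨by
        intro z hz
        rcases List.mem_cons.mp hz with rfl | hz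
        · exact le_of_lt hxy
        · exact le_trans (le_of_lt hxy) (hy z hz), h⟩
    · simp only [PySem.List.insertBy, hxy, decide_false, Bool.false_eq_true, if_false]
      refine List.pairwise_cons.mpr ⟨?_, ih hys⟩
      intro z hz
      rcases (PySem.List.mem_insertBy _ _ _ _).mp hz with rfl | hz
      · exact le_of_not_gt hxy
      · exact hy z hz

theorem pv_filter_insertBy {α κ : Type} [LinearOrder κ] (key : α → κ) (p : α → Bool) (x : α) :
    ∀ (acc : List α), acc.Pairwise (fun a b => key a ≤ key b) →
      (PySem.List.insertBy (fun a b => decide (key a < key b)) x acc).filter p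
        = if p x then PySem.List.insertBy (fun a b => decide (key a < key b)) x (acc.filter p)
          else acc.filter p := by
  intro acc h
  induction acc with
  | nil => cases hpx : p x <;> simp [PySem.List.insertBy, hpx]
  | cons y ys ih =>
    rcases List.pairwise_cons.mp h with ⟨hy, hys⟩
    by_cases hxy : key x < key y
    · simp only [PySem.List.insertBy, hxy, decide_true, if_true]
      cases hpx : p x with
      | false => simp [List.filter, hpx]
      | true =>
        rw [List.filter_cons_of_pos (by simp [hpx]), if_pos rfl]
        rw [pv_insertBy_front]
        intro z hz
        have hz' := List.mem_of_mem_filter hz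
        rcases List.mem_cons.mp hz' with rfl | hz'
        · simp [hxy]
        · simp [lt_of_lt_of_le hxy (hy z hz')]
    · simp only [PySem.List.insertBy, hxy, decide_false, Bool.false_eq_true, if_false]
      cases hpy : p y with
      | false =>
        rw [List.filter_cons_of_neg (by simp [hpy]), List.filter_cons_of_neg (by simp [hpy])]
        exact ih hys
      | true =>
        rw [List.filter_cons_of_pos (by simp [hpy]), List.filter_cons_of_pos (by simp [hpy])]
        rw [ih hys]
        cases hpx : p x with
        | false => simp
        | true => simp [PySem.List.insertBy, hxy]

theorem pv_foldl_ins_filter {α κ : Type} [LinearOrder κ] (key : α → κ) (p : α → Bool) :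
    ∀ (l acc : List α), acc.Pairwise (fun a b => key a ≤ key b) →
      (l.foldl (fun a x => PySem.List.insertBy (fun a b => decide (key a < key b)) x a) acc).filter p
        = (l.filter p).foldl (fun a x => PySem.List.insertBy (fun a b => decide (key a < key b)) x a)
            (acc.filter p) := by
  intro l
  induction l with
  | nil => intro acc _; rfl
  | cons x xs ih =>
    intro acc h
    simp only [List.foldl_cons]
    rw [ih _ (pv_insertBy_pairwise key x acc h)]
    rw [pv_filter_insertBy key p x acc h]
    cases hpx : p x with
    | false =>
      rw [List.filter_cons_of_neg (by simp [hpx])]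
      simp
    | true =>
      rw [List.filter_cons_of_pos (by simp [hpx]), List.foldl_cons]
      simp

-- (sorted l).filter p = sorted (l.filter p)  — stability of Python's sort
theorem pv_filter_sorted {α κ : Type} [LinearOrder κ] (key : α → κ) (p : α → Bool) (l : List α) :
    (PySem.List.sorted l key false).filter p = PySem.List.sorted (l.filter p) key false := by
  rw [PySem.List.sorted_eq_foldl_insertBy, PySem.List.sorted_eq_foldl_insertBy]
  simpa using pv_foldl_ins_filter key p l [] (by simp)

-- ---- the distinct days of the globally sorted list are the sorted distinct days ----

theorem pv_ofList_sublist {α : Type} [BEq α] [LawfulBEq α] :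
    ∀ (xs : List α), (PySem.Set.ofList xs).Sublist xs := by
  intro xs
  induction xs with
  | nil => simp [PySem.Set.ofList_nil]
  | cons x t ih =>
    rw [PySem.Set.ofList_cons]
    exact List.Sublist.cons₂ x (List.Sublist.trans List.filter_sublist ih)

theorem pv_days_sorted (kept : List (List (String × String))) :
    PySem.Set.ofList ((PySem.List.sorted kept (fun x => pvCA x) false).map pvDay)
      = PySem.List.sorted (PySem.Set.ofList (kept.map pvDay)) (fun k => k) false := by
  apply Eq.symm
  apply PySem.List.sorted_eq_of_perm_of_pairwise_lt
  · apply (List.perm_ext_iff_of_nodup (PySem.Set.nodup_ofList _) (PySem.Set.nodup_ofList _)).mpr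
    intro d
    simp only [PySem.Set.mem_ofList, List.mem_map]
    exact ⟨fun ⟨a, ha, h⟩ => ⟨a, (PySem.List.mem_sorted _ _ _ _).mp ha, h⟩,
           fun ⟨a, ha, h⟩ => ⟨a, (PySem.List.mem_sorted _ _ _ _).mpr ha, h⟩⟩
  · have hle : ((PySem.List.sorted kept (fun x => pvCA x) false).map pvDay).Pairwise (· ≤ ·) :=
      List.pairwise_map.mpr ((PySem.List.sorted_pairwise kept (fun x => pvCA x)).imp
        (fun h => pv_day_mono _ _ h))
    have hset := List.Pairwise.sublist
      (pv_ofList_sublist ((PySem.List.sorted kept (fun x => pvCA x) false).map pvDay)) hle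
    have hnd : (PySem.Set.ofList ((PySem.List.sorted kept (fun x => pvCA x) false).map pvDay)).Pairwise (· ≠ ·) :=
      PySem.Set.nodup_ofList _
    exact (hset.and hnd).imp (fun ⟨h1, h2⟩ => lt_of_le_of_ne h1 h2)

-- ===== VERDICT (by name: the statement is the Claim_ definition above) =====
theorem group_by_day_py_spec : Claim_equal_group_by_day_py := by
  intro items _
  unfold Spec_group_by_day_py group_by_day_py group_by_day_py_alt
  dsimp only
  rw [pv_buckets_keys]
  have hnd : (PySem.List.sorted (PySem.Set.ofList ((items.filter (fun it => decide (pvCA it ≠ ""))).map pvDay)) (fun k => k) false).Nodup :=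
    (PySem.List.sorted_perm _ _ _).nodup_iff.mpr (PySem.Set.nodup_ofList _)
  rw [pv_foldl_insert_items _ _ _ hnd (by intro k _; rfl)]
  rw [PySem.Dict.items_eq_map_keys _
    (PySem.Dict.nodup_keys_foldl_modify_key _ pvDay [] (fun _ it l => l ++ [it]) _ (by simp)) []]
  rw [pv_group_keys, pv_days_sorted]
  apply List.map_congr_left
  intro d _
  rw [pv_group_getD, pv_buckets_getD, pv_filter_sorted]
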